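-- pv_equiv track=rewrite | github.com/kuldeeepy/Data-Structures-and-Algorithms | Array/main.py | maxProdSubarr
-- ===== SOURCE A (Python) =====
-- def maxProdSubarr(arr):
--     res = arr[0]
--     for i in range(len(arr)-1):
--         prod = arr[i]
--         for j in range(i+1, len(arr)):
--             res = max(res, prod)
--             prod *= arr[j]
--         res = max(res, prod)
--     return res
-- ===== SOURCE B (Python) =====
-- def maxProdSubarr(arr):
--     res = mx = mn = arr[0]
--     for a in arr[1:]:
--         cands = (a, mx * a, mn * a)
--         mx, mn = max(cands), min(cands)
--         res = max(res, mx)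
--     return res
-- ===== Notes on version B (the rewrite author's own statement) =====
-- stated objective: faster
-- what changed: A scans every start index and re-multiplies along each suffix (all O(n^2) subarray products); B is the standard one-pass maximum-product-subarray DP keeping the running max/min product of subarrays ending at the current index.
-- intended difference: On inputs of length >= 2 where the final element alone strictly exceeds the product of every other contiguous subarray (e.g. [0, 5]), A returns that smaller maximum because its loops never consider the final element as a one-element subarray, while B returns the final element, the true maximum subarray product, which is the intended value. — e.g. on maxProdSubarr([0, 5]): A returns 0, B returns 5
import Mathlib
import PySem

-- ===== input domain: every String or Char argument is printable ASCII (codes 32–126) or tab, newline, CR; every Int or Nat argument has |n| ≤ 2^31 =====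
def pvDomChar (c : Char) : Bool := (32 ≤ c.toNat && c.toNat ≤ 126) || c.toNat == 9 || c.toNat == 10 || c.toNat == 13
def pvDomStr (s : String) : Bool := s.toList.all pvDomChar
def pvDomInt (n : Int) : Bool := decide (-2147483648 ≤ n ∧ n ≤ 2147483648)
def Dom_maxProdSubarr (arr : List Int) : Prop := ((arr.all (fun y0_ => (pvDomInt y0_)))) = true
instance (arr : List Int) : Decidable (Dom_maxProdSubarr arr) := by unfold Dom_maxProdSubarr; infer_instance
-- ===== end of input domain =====

-- B replaces A's quadratic scan over all start positions by the standard one-pass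
-- max/min running-product recurrence (maximum product over ALL contiguous subarrays);
-- A accidentally never considers the final element as a one-element subarray, so on the
-- exceptional inputs D_ below the two values differ and B's is the intended one.

-- ===== PORT A =====
def maxProdSubarr (arr : List Int) : Int :=
  (PySem.List.pyRange 0 ((arr.length : Int) - 1) 1).foldl
    (fun res i =>
      let st := (PySem.List.pyRange (i + 1) (arr.length : Int) 1).foldl
        (fun (st : Int × Int) j => (max st.1 st.2, st.2 * PySem.List.pyGetD arr j 0))
        (res, PySem.List.pyGetD arr i 0)
      max st.1 st.2)
    (PySem.List.pyGetD arr 0 0)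

-- ===== PORT B =====
def maxProdSubarr_alt (arr : List Int) : Int :=
  let a0 := PySem.List.pyGetD arr 0 0
  let st := (PySem.List.slice arr (some 1) none).foldl
    (fun (st : Int × Int × Int) a =>
      let hi := max a (max (st.2.1 * a) (st.2.2 * a))
      let lo := min a (min (st.2.1 * a) (st.2.2 * a))
      (max st.1 hi, hi, lo))
    (a0, a0, a0)
  st.1

-- ===== PRECONDITION & SPEC =====
-- Pre_ excludes only the empty list, on which A raises IndexError reading the first element.
def Pre_maxProdSubarr (arr : List Int) : Prop := arr ≠ []
instance (arr : List Int) : Decidable (Pre_maxProdSubarr arr) := by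
  unfold Pre_maxProdSubarr; infer_instance
def pvWitness_maxProdSubarr : List Int := [2, -3, 4]

-- On inputs of length ≥ 2 where the final element alone strictly exceeds the product of
-- every other contiguous subarray, A returns that smaller maximum (its loops never consider
-- the final element as a one-element subarray) while B returns the final element, the true
-- maximum subarray product, which is the intended value.
def D_maxProdSubarr (arr : List Int) : Prop :=
  2 ≤ arr.length ∧
    ∀ i < arr.length - 1, ∀ l < arr.length,
      ((arr.drop i).take (l + 1)).prod < arr.getD (arr.length - 1) 0
instance (arr : List Int) : Decidable (D_maxProdSubarr arr) := by
  unfold D_maxProdSubarr; infer_instance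

def Spec_maxProdSubarr (arr : List Int) (out : Int) : Prop :=
  ¬ D_maxProdSubarr arr → out = maxProdSubarr_alt arr
instance (arr : List Int) (out : Int) : Decidable (Spec_maxProdSubarr arr out) := by
  unfold Spec_maxProdSubarr; infer_instance

def pvDiffWitness_maxProdSubarr : List Int := [0, 5]
def pvDiffWitnessOut_maxProdSubarr : Int × Int := (0, 5)

-- ===== CLAIM (what is proved, stated in full; the proofs are below) =====
def Claim_unchanged_maxProdSubarr : Prop :=
  ∀ (arr : List Int), Dom_maxProdSubarr arr → Pre_maxProdSubarr arr →
    Spec_maxProdSubarr arr (maxProdSubarr arr)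
def Claim_changed_maxProdSubarr : Prop :=
  Dom_maxProdSubarr (pvDiffWitness_maxProdSubarr) ∧
  Pre_maxProdSubarr (pvDiffWitness_maxProdSubarr) ∧
  D_maxProdSubarr (pvDiffWitness_maxProdSubarr) ∧
  maxProdSubarr (pvDiffWitness_maxProdSubarr) = pvDiffWitnessOut_maxProdSubarr.1 ∧
  maxProdSubarr_alt (pvDiffWitness_maxProdSubarr) = pvDiffWitnessOut_maxProdSubarr.2 ∧
  pvDiffWitnessOut_maxProdSubarr.1 ≠ pvDiffWitnessOut_maxProdSubarr.2
def Claim_exact_maxProdSubarr : Prop :=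
  ∀ (arr : List Int), Dom_maxProdSubarr arr → Pre_maxProdSubarr arr →
    D_maxProdSubarr arr → maxProdSubarr arr ≠ maxProdSubarr_alt arr

-- ===== LEMMAS AND PROOFS =====

-- arr[k] for a Nat index, and the product of the length-t segment starting at index s
def pvG (arr : List Int) (k : Nat) : Int := arr.getD k 0
def pvSprod (arr : List Int) (s t : Nat) : Int :=
  ((List.range' s t).map (pvG arr)).prod

-- the contiguous segment as drop/take, identified with its range' description
theorem pvSeg_eq (arr : List Int) (i t : Nat) (h : i + t ≤ arr.length) :
    (arr.drop i).take t = (List.range' i t).map (pvG arr) := by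
  apply List.ext_getElem
  · simp; omega
  · intro k h1 h2
    simp only [List.getElem_take, List.getElem_drop, List.getElem_map, List.getElem_range']
    have hk : i + k < arr.length := by simp at h2; omega
    simp [pvG, List.getD_eq_getElem?_getD, List.getElem?_eq_getElem hk]

theorem pvSeg_prod (arr : List Int) (i k : Nat) (hi : i ≤ arr.length) :
    ((arr.drop i).take k).prod = pvSprod arr i (min k (arr.length - i)) := by
  unfold pvSprod
  rw [← pvSeg_eq arr i _ (by omega)]
  congr 1
  rcases Nat.le_total k (arr.length - i) with hk | hk
  · rw [Nat.min_eq_left hk]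
  · rw [Nat.min_eq_right hk, List.take_of_length_le (by simp; omega), List.take_of_length_le (by simp)]

-- D_'s bound, read back as a bound on every admissible segment product
theorem pvD_all (arr : List Int)
    (hall : ∀ i < arr.length - 1, ∀ l < arr.length,
      ((arr.drop i).take (l + 1)).prod < arr.getD (arr.length - 1) 0) :
    ∀ i < arr.length - 1, ∀ l, 1 ≤ l → i + l ≤ arr.length →
      pvSprod arr i l < pvG arr (arr.length - 1) := by
  intro i hi l h1 hil
  have h := hall i hi (l - 1) (by omega)
  rw [pvSeg_prod arr i _ (by omega), show l - 1 + 1 = l from by omega,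
    Nat.min_eq_left (by omega)] at h
  exact h

-- the partial products p, p·arr[s], …, p·arr[s]⋯arr[s+len-2] (len of them)
def pvPartials (arr : List Int) (p : Int) (s len : Nat) : List Int :=
  (List.range len).map (fun t => p * pvSprod arr s t)

-- (max, min) product over all segments ending at index j
def pvE (arr : List Int) : Nat → Int × Int
  | 0 => (pvG arr 0, pvG arr 0)
  | j + 1 =>
    (max (pvG arr (j + 1)) (max ((pvE arr j).1 * pvG arr (j + 1)) ((pvE arr j).2 * pvG arr (j + 1))),
     min (pvG arr (j + 1)) (min ((pvE arr j).1 * pvG arr (j + 1)) ((pvE arr j).2 * pvG arr (j + 1))))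

-- B's running best after the ends 1..m have been folded in
def pvRes (arr : List Int) (m : Nat) : Int :=
  List.foldl max (pvG arr 0) ((List.range' 1 m).map (fun j => (pvE arr j).1))

-- A's value in canonical form: max over starts i of max over the partial products from i
def pvAC (arr : List Int) : Int :=
  (List.range (arr.length - 1)).foldl
    (fun r i => List.foldl max r (pvPartials arr (pvG arr i) (i + 1) (arr.length - 1 - i + 1)))
    (pvG arr 0)

-- max over all subarrays that are not the final singleton, in running form
def pvBC (arr : List Int) : Int :=
  max (pvRes arr (arr.length - 2))
    (max ((pvE arr (arr.length - 2)).1 * pvG arr (arr.length - 1))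
         ((pvE arr (arr.length - 2)).2 * pvG arr (arr.length - 1)))

theorem pvSprod_zero (arr : List Int) (s : Nat) : pvSprod arr s 0 = 1 := rfl

theorem pvSprod_one (arr : List Int) (s : Nat) : pvSprod arr s 1 = pvG arr s := by
  simp [pvSprod]

theorem pvSprod_succ (arr : List Int) (s t : Nat) :
    pvSprod arr s (t + 1) = pvSprod arr s t * pvG arr (s + t) := by
  simp [pvSprod, List.range'_1_concat]

theorem pvSprod_cons (arr : List Int) (s t : Nat) :
    pvSprod arr s (t + 1) = pvG arr s * pvSprod arr (s + 1) t := by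
  simp [pvSprod, List.range'_succ]

theorem pvE_zero (arr : List Int) : pvE arr 0 = (pvG arr 0, pvG arr 0) := rfl

theorem pvE1_succ (arr : List Int) (j : Nat) :
    (pvE arr (j + 1)).1 = max (pvG arr (j + 1))
      (max ((pvE arr j).1 * pvG arr (j + 1)) ((pvE arr j).2 * pvG arr (j + 1))) := rfl

theorem pvE2_succ (arr : List Int) (j : Nat) :
    (pvE arr (j + 1)).2 = min (pvG arr (j + 1))
      (min ((pvE arr j).1 * pvG arr (j + 1)) ((pvE arr j).2 * pvG arr (j + 1))) := rfl

-- multiplying a value bracketed between lo and hi by any a keeps it inside the flipped bracket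
theorem pvFlip (lo hi t a : Int) (h1 : lo ≤ t) (h2 : t ≤ hi) :
    t * a ≤ max (hi * a) (lo * a) ∧ min (hi * a) (lo * a) ≤ t * a := by
  rcases le_total 0 a with ha | ha
  · exact ⟨le_max_of_le_left (mul_le_mul_of_nonneg_right h2 ha),
      min_le_of_right_le (mul_le_mul_of_nonneg_right h1 ha)⟩
  · exact ⟨le_max_of_le_right (mul_le_mul_of_nonpos_right h1 ha),
      min_le_of_left_le (mul_le_mul_of_nonpos_right h2 ha)⟩

theorem pvFoldlMaxMem (l : List Int) : ∀ r : Int, List.foldl max r l = r ∨ List.foldl max r l ∈ l := by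
  induction l with
  | nil => intro r; left; rfl
  | cons x l ih =>
    intro r
    rcases ih (max r x) with h | h
    · rw [List.foldl_cons, h]
      rcases max_choice r x with h' | h'
      · left; exact h'
      · right; rw [h']; exact List.mem_cons_self
    · right; exact List.mem_cons_of_mem _ h

-- every segment product ending at j lies between (pvE arr j).2 and (pvE arr j).1
theorem pvE_bounds (arr : List Int) : ∀ j i, i ≤ j →
    (pvE arr j).2 ≤ pvSprod arr i (j + 1 - i) ∧ pvSprod arr i (j + 1 - i) ≤ (pvE arr j).1 := by
  intro j
  induction j with
  | zero =>
    intro i hi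
    have h0 : i = 0 := by omega
    subst h0
    simp [pvE_zero, pvSprod_one]
  | succ j ih =>
    intro i hi
    by_cases hij : i = j + 1
    · subst hij
      have h1 : j + 1 + 1 - (j + 1) = 1 := by omega
      rw [h1, pvSprod_one]
      exact ⟨by rw [pvE2_succ]; exact min_le_left _ _,
             by rw [pvE1_succ]; exact le_max_left _ _⟩
    · have hle : i ≤ j := by omega
      have hlen : j + 1 + 1 - i = (j + 1 - i) + 1 := by omega
      have hidx : i + (j + 1 - i) = j + 1 := by omega
      rw [hlen, pvSprod_succ, hidx]
      obtain ⟨hb1, hb2⟩ := ih i hle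
      obtain ⟨hf1, hf2⟩ := pvFlip (pvE arr j).2 (pvE arr j).1
        (pvSprod arr i (j + 1 - i)) (pvG arr (j + 1)) hb1 hb2
      constructor
      · rw [pvE2_succ]; exact le_trans (min_le_right _ _) hf2
      · rw [pvE1_succ]; exact le_trans hf1 (le_max_right _ _)

-- both components of pvE are themselves segment products ending at j
theorem pvE_mem (arr : List Int) : ∀ j,
    (∃ i, i ≤ j ∧ (pvE arr j).1 = pvSprod arr i (j + 1 - i)) ∧
    (∃ i, i ≤ j ∧ (pvE arr j).2 = pvSprod arr i (j + 1 - i)) := by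
  intro j
  induction j with
  | zero => exact ⟨⟨0, le_refl _, by simp [pvE_zero, pvSprod_one]⟩,
                   ⟨0, le_refl _, by simp [pvE_zero, pvSprod_one]⟩⟩
  | succ j ih =>
    obtain ⟨⟨i1, hi1, he1⟩, ⟨i2, hi2, he2⟩⟩ := ih
    constructor
    · rcases max_choice (pvG arr (j + 1))
        (max ((pvE arr j).1 * pvG arr (j + 1)) ((pvE arr j).2 * pvG arr (j + 1))) with h | h
      · refine ⟨j + 1, le_refl _, ?_⟩
        have h1 : j + 1 + 1 - (j + 1) = 1 := by omega
        rw [pvE1_succ, h, h1, pvSprod_one]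
      · rcases max_choice ((pvE arr j).1 * pvG arr (j + 1)) ((pvE arr j).2 * pvG arr (j + 1))
          with h' | h'
        · refine ⟨i1, by omega, ?_⟩
          have hlen : j + 1 + 1 - i1 = (j + 1 - i1) + 1 := by omega
          have hidx : i1 + (j + 1 - i1) = j + 1 := by omega
          rw [pvE1_succ, h, h', he1, hlen, pvSprod_succ, hidx]
        · refine ⟨i2, by omega, ?_⟩
          have hlen : j + 1 + 1 - i2 = (j + 1 - i2) + 1 := by omega
          have hidx : i2 + (j + 1 - i2) = j + 1 := by omega
          rw [pvE1_succ, h, h', he2, hlen, pvSprod_succ, hidx]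
    · rcases min_choice (pvG arr (j + 1))
        (min ((pvE arr j).1 * pvG arr (j + 1)) ((pvE arr j).2 * pvG arr (j + 1))) with h | h
      · refine ⟨j + 1, le_refl _, ?_⟩
        have h1 : j + 1 + 1 - (j + 1) = 1 := by omega
        rw [pvE2_succ, h, h1, pvSprod_one]
      · rcases min_choice ((pvE arr j).1 * pvG arr (j + 1)) ((pvE arr j).2 * pvG arr (j + 1))
          with h' | h'
        · refine ⟨i1, by omega, ?_⟩
          have hlen : j + 1 + 1 - i1 = (j + 1 - i1) + 1 := by omega
          have hidx : i1 + (j + 1 - i1) = j + 1 := by omega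
          rw [pvE2_succ, h, h', he1, hlen, pvSprod_succ, hidx]
        · refine ⟨i2, by omega, ?_⟩
          have hlen : j + 1 + 1 - i2 = (j + 1 - i2) + 1 := by omega
          have hidx : i2 + (j + 1 - i2) = j + 1 := by omega
          rw [pvE2_succ, h, h', he2, hlen, pvSprod_succ, hidx]

-- A's inner loop computes the foldl-max of the partial products together with the full product
theorem pvInnerFold (arr : List Int) (s : Nat) : ∀ (len : Nat) (res p : Int),
    (List.range len).foldl
      (fun (st : Int × Int) t => (max st.1 st.2, st.2 * pvG arr (s + t))) (res, p)
    = (List.foldl max res (pvPartials arr p s len), p * pvSprod arr s len) := by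
  intro len
  induction len with
  | zero => intro res p; simp [pvPartials, pvSprod_zero]
  | succ len ih =>
    intro res p
    rw [List.range_succ, List.foldl_append, ih]
    simp only [List.foldl_cons, List.foldl_nil]
    rw [Prod.mk.injEq]
    constructor
    · simp [pvPartials, List.range_succ]
    · rw [pvSprod_succ, mul_assoc]

-- generic facts about a fold of foldl-max blocks
theorem pvGfold_ge (L : Nat → List Int) : ∀ (m : Nat) (res : Int),
    res ≤ (List.range m).foldl (fun r i => List.foldl max r (L i)) res ∧
    ∀ i < m, ∀ x ∈ L i, x ≤ (List.range m).foldl (fun r i => List.foldl max r (L i)) res := by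
  intro m
  induction m with
  | zero => intro res; exact ⟨le_refl _, by omega⟩
  | succ m ih =>
    intro res
    rw [List.range_succ, List.foldl_append]
    simp only [List.foldl_cons, List.foldl_nil]
    obtain ⟨h1, h2⟩ := ih res
    have hmono := PySem.List.le_foldl_max (L m)
      ((List.range m).foldl (fun r i => List.foldl max r (L i)) res)
    constructor
    · exact le_trans h1 hmono.1
    · intro i hi x hx
      rcases Nat.lt_or_ge i m with h | h
      · exact le_trans (h2 i h x hx) hmono.1
      · have : i = m := by omega
        subst this
        exact hmono.2 x hx

theorem pvGfold_mem (L : Nat → List Int) : ∀ (m : Nat) (res : Int),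
    (List.range m).foldl (fun r i => List.foldl max r (L i)) res = res ∨
    ∃ i < m, (List.range m).foldl (fun r i => List.foldl max r (L i)) res ∈ L i := by
  intro m
  induction m with
  | zero => intro res; left; rfl
  | succ m ih =>
    intro res
    rw [List.range_succ, List.foldl_append]
    simp only [List.foldl_cons, List.foldl_nil]
    rcases pvFoldlMaxMem (L m) ((List.range m).foldl (fun r i => List.foldl max r (L i)) res)
      with hm | hm
    · rw [hm]
      rcases ih res with h | ⟨i, hi, h⟩
      · left; exact h
      · right; exact ⟨i, by omega, h⟩
    · right; exact ⟨m, by omega, hm⟩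

-- specialisations of the generic facts to pvAC
theorem pvAC_ge (arr : List Int) :
    pvG arr 0 ≤ pvAC arr ∧
    ∀ i < arr.length - 1, ∀ x ∈ pvPartials arr (pvG arr i) (i + 1) (arr.length - 1 - i + 1),
      x ≤ pvAC arr := by
  unfold pvAC
  exact pvGfold_ge _ _ _

theorem pvAC_mem (arr : List Int) :
    pvAC arr = pvG arr 0 ∨
    ∃ i < arr.length - 1, pvAC arr ∈ pvPartials arr (pvG arr i) (i + 1) (arr.length - 1 - i + 1) := by
  unfold pvAC
  exact pvGfold_mem _ _ _

-- A's port equals its canonical form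
theorem pvA_canon (arr : List Int) : maxProdSubarr arr = pvAC arr := by
  unfold maxProdSubarr pvAC
  rw [PySem.List.pyRange_one, List.foldl_map, PySem.List.pyGetD_zero]
  have hcut : ((arr.length : Int) - 1 - 0).toNat = arr.length - 1 := by omega
  rw [hcut]
  simp only [pvG]
  refine PySem.List.foldl_congr_mem _ _ _ _ ?_
  intro res k hk
  have hk' := List.mem_range.mp hk
  have hz : (0 : Int) + (k : Int) = ((k : Nat) : Int) := by omega
  rw [hz, PySem.List.pyGetD_natCast]
  have h2 : ((k : Int) + 1) = (((k + 1 : Nat)) : Int) := by push_cast; ring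
  rw [h2, PySem.List.pyRange_one, List.foldl_map]
  have h3 : ((arr.length : Int) - ((k + 1 : Nat) : Int)).toNat = arr.length - 1 - k := by omega
  rw [h3]
  have hinner : (List.range (arr.length - 1 - k)).foldl
      (fun (st : Int × Int) (t : Nat) =>
        (max st.1 st.2, st.2 * PySem.List.pyGetD arr (((k + 1 : Nat) : Int) + (t : Int)) 0))
      (res, arr.getD k 0)
      = (List.range (arr.length - 1 - k)).foldl
      (fun (st : Int × Int) t => (max st.1 st.2, st.2 * pvG arr (k + 1 + t)))
      (res, arr.getD k 0) := by
    refine PySem.List.foldl_congr_mem _ _ _ _ ?_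
    intro st t _
    have hc : (((k + 1 : Nat)) : Int) + (t : Int) = (((k + 1 + t : Nat)) : Int) := by
      push_cast; ring
    rw [hc, PySem.List.pyGetD_natCast]
    rfl
  rw [hinner, pvInnerFold]
  simp [pvPartials, List.range_succ]

-- arr[1:] lists exactly the elements arr[1], …, arr[n-1]
theorem pvTail_eq (arr : List Int) :
    arr.tail = (List.range' 1 (arr.length - 1)).map (pvG arr) := by
  apply List.ext_getElem
  · simp
  · intro i h1 h2
    simp only [List.getElem_tail, List.getElem_map, List.getElem_range']
    have hlen : i + 1 < arr.length := by simp at h1; omega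
    simp [pvG, List.getD_eq_getElem?_getD, Nat.add_comm 1 i,
      List.getElem?_eq_getElem hlen]

-- B's loop invariant: after folding the ends 1..m the state is (pvRes m, pvE m)
theorem pvB_inv (arr : List Int) : ∀ m : Nat,
    ((List.range' 1 m).map (pvG arr)).foldl
      (fun (st : Int × Int × Int) a =>
        (max st.1 (max a (max (st.2.1 * a) (st.2.2 * a))),
         max a (max (st.2.1 * a) (st.2.2 * a)),
         min a (min (st.2.1 * a) (st.2.2 * a))))
      (pvG arr 0, pvG arr 0, pvG arr 0)
    = (pvRes arr m, (pvE arr m).1, (pvE arr m).2) := by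
  intro m
  induction m with
  | zero => rfl
  | succ m ih =>
    rw [List.range'_1_concat, List.map_append, List.foldl_append, ih]
    simp only [List.map_cons, List.map_nil, List.foldl_cons, List.foldl_nil]
    have he : 1 + m = m + 1 := by omega
    rw [he]
    rw [Prod.mk.injEq, Prod.mk.injEq]
    refine ⟨?_, (pvE1_succ arr m).symm, (pvE2_succ arr m).symm⟩
    unfold pvRes
    rw [List.range'_1_concat, List.map_append, List.foldl_append]
    simp [he, pvE1_succ]

-- B's port equals max over ends 0..n-1 of the best product ending there
theorem pvB_canon (arr : List Int) : maxProdSubarr_alt arr = pvRes arr (arr.length - 1) := by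
  unfold maxProdSubarr_alt
  rw [PySem.List.slice_from_one, PySem.List.pyGetD_zero, pvTail_eq]
  have := pvB_inv arr (arr.length - 1)
  simp only [pvG] at this ⊢
  rw [this]

-- for n ≥ 2, B's value is the max of A's candidate set and the last element
theorem pvB_eq_max (arr : List Int) (hn : 2 ≤ arr.length) :
    maxProdSubarr_alt arr = max (pvBC arr) (pvG arr (arr.length - 1)) := by
  rw [pvB_canon]
  have hm : arr.length - 1 = (arr.length - 2) + 1 := by omega
  unfold pvBC pvRes
  rw [hm, List.range'_1_concat, List.map_append, List.foldl_append]
  simp only [List.map_cons, List.map_nil, List.foldl_cons, List.foldl_nil]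
  have he : 1 + (arr.length - 2) = (arr.length - 2) + 1 := by omega
  rw [he, pvE1_succ, ← hm]
  generalize List.foldl max (pvG arr 0)
    ((List.range' 1 (arr.length - 2)).map (fun j => (pvE arr j).1)) = r
  generalize pvG arr (arr.length - 1) = a
  generalize (pvE arr (arr.length - 2)).1 * a = x
  generalize (pvE arr (arr.length - 2)).2 * a = y
  rw [max_left_comm r a (max x y), max_comm a (max r (max x y))]

-- every admissible segment product is ≤ pvAC
theorem pvSprod_le_AC (arr : List Int) (hn : 2 ≤ arr.length) (i l : Nat)
    (hi : i ≤ arr.length - 2) (hl : 1 ≤ l) (hil : i + l ≤ arr.length) :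
    pvSprod arr i l ≤ pvAC arr := by
  apply (pvAC_ge arr).2 i (by omega)
  unfold pvPartials
  rw [List.mem_map]
  refine ⟨l - 1, List.mem_range.mpr (by omega), ?_⟩
  have hl' : l - 1 + 1 = l := by omega
  rw [← pvSprod_cons, hl']

theorem pvG0_le_BC (arr : List Int) : pvG arr 0 ≤ pvBC arr := by
  unfold pvBC
  exact le_max_of_le_left (PySem.List.le_foldl_max _ _).1

theorem pvEM_le_BC (arr : List Int) (j : Nat) (hj1 : 1 ≤ j) (hj2 : j ≤ arr.length - 2) :
    (pvE arr j).1 ≤ pvBC arr := by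
  unfold pvBC
  apply le_max_of_le_left
  apply (PySem.List.le_foldl_max _ _).2
  rw [List.mem_map]
  exact ⟨j, List.mem_range'_1.mpr (by omega), rfl⟩

theorem pvBC_le_AC (arr : List Int) (hn : 2 ≤ arr.length) : pvBC arr ≤ pvAC arr := by
  unfold pvBC
  apply max_le
  · rcases pvFoldlMaxMem ((List.range' 1 (arr.length - 2)).map (fun j => (pvE arr j).1))
      (pvG arr 0) with hm | hm
    · unfold pvRes
      rw [hm]
      exact (pvAC_ge arr).1
    · unfold pvRes
      rw [List.mem_map] at hm
      obtain ⟨j, hj, hje⟩ := hm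
      rw [List.mem_range'_1] at hj
      obtain ⟨⟨i, hij, hie⟩, -⟩ := pvE_mem arr j
      rw [← hje, hie]
      exact pvSprod_le_AC arr hn i (j + 1 - i) (by omega) (by omega) (by omega)
  · obtain ⟨⟨i1, hi1, he1⟩, ⟨i2, hi2, he2⟩⟩ := pvE_mem arr (arr.length - 2)
    have key : ∀ i, i ≤ arr.length - 2 →
        pvSprod arr i (arr.length - 2 + 1 - i) * pvG arr (arr.length - 1) ≤ pvAC arr := by
      intro i hi
      have hlen : arr.length - 2 + 1 - i + 1 = arr.length - i := by omega
      have hidx : i + (arr.length - 2 + 1 - i) = arr.length - 1 := by omega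
      have hs := pvSprod_succ arr i (arr.length - 2 + 1 - i)
      rw [hidx, hlen] at hs
      rw [← hs]
      exact pvSprod_le_AC arr hn i (arr.length - i) hi (by omega) (by omega)
    apply max_le
    · rw [he1]; exact key i1 hi1
    · rw [he2]; exact key i2 hi2

theorem pvAC_le_BC (arr : List Int) (hn : 2 ≤ arr.length) : pvAC arr ≤ pvBC arr := by
  rcases pvAC_mem arr with hm | ⟨i, hi, hm⟩
  · rw [hm]; exact pvG0_le_BC arr
  · unfold pvPartials at hm
    rw [List.mem_map] at hm
    obtain ⟨t, ht, hte⟩ := hm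
    rw [List.mem_range] at ht
    rw [← pvSprod_cons] at hte
    rcases Nat.lt_or_ge (i + t) (arr.length - 1) with hj | hj
    · have hb := (pvE_bounds arr (i + t) i (by omega)).2
      have he : i + t + 1 - i = t + 1 := by omega
      rw [he, hte] at hb
      rcases Nat.eq_zero_or_pos (i + t) with h0 | h0
      · have hE : (pvE arr (i + t)).1 = pvG arr 0 := by rw [h0]; rfl
        rw [hE] at hb
        exact le_trans hb (pvG0_le_BC arr)
      · exact le_trans hb (pvEM_le_BC arr (i + t) h0 (by omega))
    · have ht1 : 1 ≤ t := by omega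
      have hsp : pvSprod arr i (t + 1) = pvSprod arr i t * pvG arr (arr.length - 1) := by
        rw [pvSprod_succ, show i + t = arr.length - 1 from by omega]
      have hb := pvE_bounds arr (arr.length - 2) i (by omega)
      have hlen : arr.length - 2 + 1 - i = t := by omega
      rw [hlen] at hb
      have hf := pvFlip (pvE arr (arr.length - 2)).2 (pvE arr (arr.length - 2)).1
        (pvSprod arr i t) (pvG arr (arr.length - 1)) hb.1 hb.2
      rw [← hte, hsp]
      exact le_trans hf.1 (by unfold pvBC; exact le_max_right _ _)

theorem pvAC_eq_BC (arr : List Int) (hn : 2 ≤ arr.length) : pvAC arr = pvBC arr :=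
  le_antisymm (pvAC_le_BC arr hn) (pvBC_le_AC arr hn)

-- inside D_, A's value lies strictly below the last element
theorem pvAC_lt_last (arr : List Int) (hn : 2 ≤ arr.length)
    (hall : ∀ i < arr.length - 1, ∀ l, 1 ≤ l → i + l ≤ arr.length →
      pvSprod arr i l < pvG arr (arr.length - 1)) :
    pvAC arr < pvG arr (arr.length - 1) := by
  rcases pvAC_mem arr with hm | ⟨i, hi, hm⟩
  · rw [hm, ← pvSprod_one arr 0]
    exact hall 0 (by omega) 1 (le_refl 1) (by omega)
  · unfold pvPartials at hm
    rw [List.mem_map] at hm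
    obtain ⟨t, ht, hte⟩ := hm
    rw [List.mem_range] at ht
    rw [← pvSprod_cons] at hte
    rw [← hte]
    exact hall i hi (t + 1) (by omega) (by omega)

-- ===== VERDICT (by name: the statements are the Claim_ definitions above) =====
theorem maxProdSubarr_spec : Claim_unchanged_maxProdSubarr := by
  intro arr _ hpre
  unfold Spec_maxProdSubarr
  intro hnD
  rcases Nat.lt_or_ge arr.length 2 with h2 | h2
  · cases arr with
    | nil => exact absurd rfl hpre
    | cons a t =>
      cases t with
      | nil => rfl
      | cons b t' => simp at h2
  · have hall : ∃ i < arr.length - 1, ∃ l < arr.length,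
        arr.getD (arr.length - 1) 0 ≤ ((arr.drop i).take (l + 1)).prod := by
      by_contra hc
      push Not at hc
      exact hnD ⟨h2, hc⟩
    obtain ⟨i, hi, l, hl, hlast⟩ := hall
    rw [pvSeg_prod arr i _ (by omega)] at hlast
    have hle : pvG arr (arr.length - 1) ≤ pvAC arr :=
      le_trans hlast (pvSprod_le_AC arr h2 i _ (by omega) (by omega) (by omega))
    rw [pvA_canon, pvB_eq_max arr h2, ← pvAC_eq_BC arr h2]
    exact (max_eq_left hle).symm

theorem maxProdSubarr_changed : Claim_changed_maxProdSubarr := by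
  unfold Claim_changed_maxProdSubarr; decide

theorem maxProdSubarr_tight : Claim_exact_maxProdSubarr := by
  intro arr _ _ hD
  obtain ⟨h2, hall⟩ := hD
  have hlt := pvAC_lt_last arr h2 (pvD_all arr hall)
  rw [pvA_canon, pvB_eq_max arr h2, ← pvAC_eq_BC arr h2,
    max_eq_right (le_of_lt hlt)]
  exact ne_of_lt hlt
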